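-- pv_equiv track=rewrite | github.com/Saharsh-R/adventofcode | y2025/d6/test_d6_y2025.py | get_p1
-- ===== SOURCE A (Python) =====
-- def get_p1(input_d1: list[str]):
--
--
--     mat = [s.split() for s in input_d1]
--     n, m = len(mat), len(mat[0])
--     def f_mul(row):
--         ans = 1
--         for j in range(n - 1):
--             ans *= int(mat[j][row])
--         return ans
--
--     def f_add(row):
--         return sum(int(mat[i][row]) for i in range(n - 1))
--
--     ans = 0
--     for row in range(m):
--         operation = mat[-1][row]
--         if operation == '*':
--             ans += f_mul(row)
--         else:
--             ans += f_add(row)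
--     return ans
-- ===== SOURCE B (Python) =====
-- def get_p1(input_d1: list[str]):
--     mat = [s.split() for s in input_d1]
--     ops = mat[-1]                      # IndexError on empty input, like A
--     m = len(mat[0])
--     # one per-column accumulator, seeded by the operator row
--     acc = [1 if ops[c] == '*' else 0 for c in range(m)]
--     # single row-major streaming pass over the data rows
--     for row in mat[:-1]:
--         for c in range(m):
--             v = int(row[c])
--             acc[c] = acc[c] * v if ops[c] == '*' else acc[c] + v
--     return sum(acc)
-- ===== Notes on version B (the rewrite author's own statement) =====
-- stated objective: alternative
-- what changed: Replaces A's column-major computation (for each column, run a fresh product or sum scan over all rows via two named helpers) with a single row-major streaming pass that maintains one per-column accumulator vector seeded from the operator row (1 for '*', 0 otherwise) and updates every column's accumulator as each data row is read; the per-column total is the final vector's sum.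
import Mathlib
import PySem

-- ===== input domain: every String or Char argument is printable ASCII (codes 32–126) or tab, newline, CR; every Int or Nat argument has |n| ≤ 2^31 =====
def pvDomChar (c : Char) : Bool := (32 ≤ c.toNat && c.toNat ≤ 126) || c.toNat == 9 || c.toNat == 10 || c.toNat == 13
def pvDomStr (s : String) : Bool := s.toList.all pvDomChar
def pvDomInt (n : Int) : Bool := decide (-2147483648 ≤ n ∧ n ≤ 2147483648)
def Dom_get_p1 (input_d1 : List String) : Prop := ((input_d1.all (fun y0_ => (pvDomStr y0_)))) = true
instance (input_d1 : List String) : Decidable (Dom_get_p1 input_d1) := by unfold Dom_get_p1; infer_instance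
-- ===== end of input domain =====

-- B replaces A's column-major double loops (per column: a fresh product/sum scan over all
-- rows) by a single row-major streaming pass maintaining one per-column accumulator vector
-- seeded from the operator row; same asymptotic cost, different traversal and state.

-- ===== PORT A =====
def get_p1 (input_d1 : List String) : Int :=
  let mat := input_d1.map PySem.Str.split₀
  let n : Int := mat.length
  let m : Int := ((PySem.List.pyGetD mat 0 []).length : Int)
  let f_mul : Int → Int := fun row =>
    (PySem.List.pyRange 0 (n - 1) 1).foldl
      (fun ans j =>
        ans * ((PySem.Int.ofStr? (PySem.List.pyGetD (PySem.List.pyGetD mat j []) row "")).getD 0)) 1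
  let f_add : Int → Int := fun row =>
    ((PySem.List.pyRange 0 (n - 1) 1).map
      (fun i => (PySem.Int.ofStr? (PySem.List.pyGetD (PySem.List.pyGetD mat i []) row "")).getD 0)).sum
  (PySem.List.pyRange 0 m 1).foldl
    (fun ans row =>
      let operation := PySem.List.pyGetD (PySem.List.pyGetD mat (-1) []) row ""
      if operation = "*" then ans + f_mul row else ans + f_add row) 0

-- ===== PORT B =====
def get_p1_alt (input_d1 : List String) : Int :=
  let mat := input_d1.map PySem.Str.split₀
  let ops := PySem.List.pyGetD mat (-1) []
  let m := (PySem.List.pyGetD mat 0 []).length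
  -- acc = [1 if ops[c] == '*' else 0 for c in range(m)]
  let acc0 : List Int :=
    (List.range m).map (fun c : Nat => if PySem.List.pyGetD ops (c : Int) "" = "*" then 1 else 0)
  -- for row in mat[:-1]: for c in range(m): acc[c] = acc[c]*v or acc[c]+v
  let accN :=
    (PySem.List.slice mat none (some (-1))).foldl
      (fun acc row =>
        (List.range m).map (fun c : Nat =>
          if PySem.List.pyGetD ops (c : Int) "" = "*" then
            acc.getD c 0 * ((PySem.Int.ofStr? (PySem.List.pyGetD row (c : Int) "")).getD 0)
          else
            acc.getD c 0 + ((PySem.Int.ofStr? (PySem.List.pyGetD row (c : Int) "")).getD 0)))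
      acc0
  accN.sum

-- ===== PRECONDITION & SPEC =====
-- Pre_ excludes exactly the inputs where A raises: the empty list (IndexError on mat[0]),
-- a row with fewer tokens than the first row (IndexError), and a non-integer token in a
-- numeric cell of the first len(mat[0]) columns (ValueError).
def Pre_get_p1 (input_d1 : List String) : Prop :=
  let mat := input_d1.map PySem.Str.split₀
  let m := (mat.headD []).length
  input_d1 ≠ [] ∧
  (∀ r ∈ mat, m ≤ r.length) ∧
  (∀ r ∈ mat.dropLast, ∀ x ∈ r.take m, (PySem.Int.ofStr? x).isSome)
instance (input_d1 : List String) : Decidable (Pre_get_p1 input_d1) := by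
  unfold Pre_get_p1; infer_instance

def pvWitness_get_p1 : List String := ["1 2 3", "4 5 6", "* + *"]

def Spec_get_p1 (input_d1 : List String) (out : Int) : Prop := out = get_p1_alt input_d1
instance (input_d1 : List String) (out : Int) : Decidable (Spec_get_p1 input_d1 out) := by
  unfold Spec_get_p1; infer_instance

-- ===== CLAIM =====
def Claim_equal_get_p1 : Prop := ∀ (input_d1 : List String), Dom_get_p1 input_d1 → Pre_get_p1 input_d1 → Spec_get_p1 input_d1 (get_p1 input_d1)

-- ===== LEMMAS AND PROOFS =====

-- a fold whose two branches both add to the accumulator is a sum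
lemma foldl_branch_add {β : Type} (l : List β) (p : β → Prop) [DecidablePred p]
    (f g : β → Int) (a : Int) :
    l.foldl (fun ans x => if p x then ans + f x else ans + g x) a
      = a + (l.map (fun x => if p x then f x else g x)).sum := by
  induction l generalizing a with
  | nil => simp
  | cons x xs ih =>
    simp only [List.foldl_cons, ih, List.map_cons, List.sum_cons]
    split <;> ring

-- the getD of a map over range, inside the range
lemma getD_map_range (m c : Nat) (hc : c < m) (i0 : Nat → Int) :
    ((List.range m).map i0).getD c 0 = i0 c := by
  simp [List.getD_eq_getElem?_getD, hc]

-- B's row-major fold over an accumulator vector commutes with indexing: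
-- the final vector is, per column, the column-wise fold
lemma foldl_map_range {β : Type} (rows : List β) (m : Nat)
    (g : Nat → Int → β → Int) (i0 : Nat → Int) :
    rows.foldl (fun acc row => (List.range m).map (fun c => g c (acc.getD c 0) row))
        ((List.range m).map i0)
      = (List.range m).map (fun c => rows.foldl (fun a row => g c a row) (i0 c)) := by
  induction rows generalizing i0 with
  | nil => rfl
  | cons r rs ih =>
    simp only [List.foldl_cons]
    have h : (List.range m).map (fun c => g c (((List.range m).map i0).getD c 0) r)
        = (List.range m).map (fun c => g c (i0 c) r) := by
      refine List.map_congr_left (fun c hc => ?_)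
      rw [getD_map_range m c (List.mem_range.mp hc)]
    rw [h, ih]

-- folding (+ f x) from 0 is the sum of the mapped list
lemma foldl_add_eq_sum {β : Type} (l : List β) (f : β → Int) (a : Int) :
    l.foldl (fun s x => s + f x) a = a + (l.map f).sum := by
  induction l generalizing a with
  | nil => simp
  | cons x xs ih => simp [List.foldl_cons, ih]; ring

-- mat[:-1] enumerated by A's index loop
lemma dropLast_eq_pyRange_map (mat : List (List String)) (hne : mat ≠ []) :
    mat.dropLast
      = (PySem.List.pyRange 0 ((mat.length : Int) - 1) 1).map
          (fun j => PySem.List.pyGetD mat j []) := by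
  have hlen : 0 < mat.length := List.length_pos_of_ne_nil hne
  apply List.ext_getElem
  · simp only [List.length_dropLast, List.length_map, PySem.List.length_pyRange_one]
    omega
  · intro k h1 h2
    have hk : k < mat.length - 1 := by simpa using h1
    simp only [List.getElem_map, PySem.List.getElem_pyRange_one, zero_add]
    rw [List.getElem_dropLast]
    have : PySem.List.pyGetD mat ((k : Int)) [] = mat.getD k [] := by
      simp [PySem.List.pyGetD_natCast]
    rw [this, List.getD_eq_getElem?_getD]
    simp [show k < mat.length from by omega]

theorem get_p1_eq (input_d1 : List String) (hpre : Pre_get_p1 input_d1) :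
    get_p1 input_d1 = get_p1_alt input_d1 := by
  obtain ⟨h1, _h2, _h3⟩ := hpre
  simp only [get_p1, get_p1_alt]
  set mat := input_d1.map PySem.Str.split₀ with hmatdef
  have hne : mat ≠ [] := by simp [hmatdef]; exact h1
  set m := (PySem.List.pyGetD mat 0 []).length with hm
  set ops := PySem.List.pyGetD mat (-1) [] with hops
  -- A's side: outer fold becomes a sum over List.range m
  rw [foldl_branch_add (PySem.List.pyRange 0 (m : Int) 1)
      (fun row => PySem.List.pyGetD ops row "" = "*") _ _ 0]
  rw [PySem.List.pyRange_one 0 (m : Int),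
    show (((m : Int) - 0).toNat) = m from by omega, List.map_map]
  -- B's side: the accumulator-vector fold becomes per-column folds
  rw [PySem.List.slice_to_neg_one,
    foldl_map_range (mat.dropLast) m
      (fun c a row =>
        if PySem.List.pyGetD ops (c : Int) "" = "*" then
          a * ((PySem.Int.ofStr? (PySem.List.pyGetD row (c : Int) "")).getD 0)
        else
          a + ((PySem.Int.ofStr? (PySem.List.pyGetD row (c : Int) "")).getD 0))
      (fun c => if PySem.List.pyGetD ops (c : Int) "" = "*" then 1 else 0)]
  rw [zero_add]
  refine congrArg List.sum (List.map_congr_left ?_)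
  intro c _
  simp only [Function.comp_def, zero_add]
  rw [dropLast_eq_pyRange_map mat hne, List.foldl_map]
  by_cases hop : PySem.List.pyGetD ops (c : Int) "" = "*"
  · simp only [hop, if_true]
  · simp only [hop, if_false]
    rw [foldl_add_eq_sum, zero_add]

-- ===== VERDICT =====
theorem get_p1_spec : Claim_equal_get_p1 := by
  intro input_d1 _hdom hpre
  unfold Spec_get_p1
  exact get_p1_eq input_d1 hpre
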